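-- pv_equiv track=rewrite | github.com/BereniceAlexiaJocteur/Euler | pb332.py | get_lattice_point
-- ===== SOURCE A (Python) =====
-- carres = [i**2 for i in range(51)]
--
-- def get_lattice_point(r): # return all lattice points on a sphere of radius r
--     l = []
--     r2 = carres[r]
--     for i in range(0, r+1):
--         i2 = carres[max(-i, i)]
--         for j in range(-r, r+1):
--             j2 = carres[max(-j, j)]
--             for k in range(-r, r+1):
--                 k2 = carres[max(-k, k)]
--                 if i2 + j2 + k2 == r2:
--                     l.append((i, j, k))
--     return l
-- ===== SOURCE B (Python) =====
-- def get_lattice_point(r): # return all lattice points on a sphere of radius r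
--     l = []
--     r2 = r * r
--     roots = {}
--     for s in range(0, r + 1):
--         roots[s * s] = s
--     for i in range(0, r + 1):
--         for j in range(-r, r + 1):
--             s = roots.get(r2 - i * i - j * j)
--             if s is not None:
--                 if s > 0:
--                     l.append((i, j, -s))
--                     l.append((i, j, s))
--                 else:
--                     l.append((i, j, 0))
--     return l
-- ===== Notes on version B (the rewrite author's own statement) =====
-- stated objective: faster
-- what changed: B drops A's innermost k-scan: it precomputes a dict mapping s*s -> s for s in 0..r and, for each (i,j), looks up r^2-i^2-j^2 to emit -s and s directly, turning O(r^3) into O(r^2); A's table lookups limit it to r <= 50, which Pre_ reflects.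
import Mathlib
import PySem

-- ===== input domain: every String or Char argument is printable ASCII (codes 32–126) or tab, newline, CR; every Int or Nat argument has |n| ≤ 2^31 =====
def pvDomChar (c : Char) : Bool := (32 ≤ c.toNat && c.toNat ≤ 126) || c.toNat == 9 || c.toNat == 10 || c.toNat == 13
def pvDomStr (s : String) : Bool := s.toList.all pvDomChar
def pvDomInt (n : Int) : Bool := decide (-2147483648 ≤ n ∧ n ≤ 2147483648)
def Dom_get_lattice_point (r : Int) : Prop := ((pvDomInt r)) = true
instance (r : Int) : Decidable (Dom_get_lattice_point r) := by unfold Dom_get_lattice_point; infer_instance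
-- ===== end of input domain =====

-- B replaces A's innermost k-scan by an O(1) lookup in a dict mapping s*s to s, precomputed once.


-- ===== PORT A =====
-- carres = [i**2 for i in range(51)]
def pvCarres : List Int := (PySem.List.pyRange 0 51 1).map (fun i => i * i)

-- literal port of A; 'carres[r]' keeps the raising pyGet? (none = IndexError, excluded by Pre_);
-- the inner carres[max(-x,x)] lookups use .getD 0 because their indices are always in 0..50
-- whenever the loops run (0 ≤ i ≤ r ≤ 50, |j|,|k| ≤ r), so Python never raises there.
def get_lattice_point (r : Int) : List (List Int) :=
  match PySem.List.pyGet? pvCarres r with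
  | none => []
  | some r2 =>
    (PySem.List.pyRange 0 (r+1) 1).foldl (fun l i =>
      let i2 := (PySem.List.pyGet? pvCarres (max (-i) i)).getD 0
      (PySem.List.pyRange (-r) (r+1) 1).foldl (fun l j =>
        let j2 := (PySem.List.pyGet? pvCarres (max (-j) j)).getD 0
        (PySem.List.pyRange (-r) (r+1) 1).foldl (fun l k =>
          let k2 := (PySem.List.pyGet? pvCarres (max (-k) k)).getD 0
          if i2 + j2 + k2 = r2 then l ++ [[i, j, k]] else l) l) l) []

-- ===== PORT B =====
-- roots = {s*s: s for s in range(0, r+1)} (built by B's first loop)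
def pvRoots (r : Int) : PySem.Dict Int Int :=
  (PySem.List.pyRange 0 (r+1) 1).foldl (fun d s => d.insert (s*s) s) PySem.Dict.empty

def get_lattice_point_alt (r : Int) : List (List Int) :=
  (PySem.List.pyRange 0 (r+1) 1).foldl (fun l i =>
    (PySem.List.pyRange (-r) (r+1) 1).foldl (fun l j =>
      match (pvRoots r).get? (r*r - i*i - j*j) with
      | none => l
      | some s => if s > 0 then l ++ [[i, j, -s], [i, j, s]] else l ++ [[i, j, 0]]) l) []

-- ===== PRECONDITION & SPEC =====
-- Pre_ excludes exactly r > 50 and r < -51, where A's 'carres[r]' raises IndexError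
-- (carres has only 51 entries); A returns on every r in [-51, 50].
def Pre_get_lattice_point (r : Int) : Prop := -51 ≤ r ∧ r ≤ 50
instance (r : Int) : Decidable (Pre_get_lattice_point r) := by unfold Pre_get_lattice_point; infer_instance
def pvWitness_get_lattice_point : Int := (5)

def Spec_get_lattice_point (r : Int) (out : List (List Int)) : Prop := out = get_lattice_point_alt r
instance (r : Int) (out : List (List Int)) : Decidable (Spec_get_lattice_point r out) := by unfold Spec_get_lattice_point; infer_instance

-- ===== CLAIM (what is proved, stated in full; the proofs are below) =====
def Claim_equal_get_lattice_point : Prop := ∀ (r : Int), Dom_get_lattice_point r → Pre_get_lattice_point r → Spec_get_lattice_point r (get_lattice_point r)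

-- ===== LEMMAS AND PROOFS =====

-- carres[m] = m*m for indices 0..50
theorem pvCarres_get (m : Int) (h0 : 0 ≤ m) (h1 : m ≤ 50) :
    PySem.List.pyGet? pvCarres m = some (m * m) := by
  unfold pvCarres
  rw [PySem.List.pyGet?_of_nonneg _ h0]
  rw [show (51 : Int) = ((51 : Nat) : Int) by norm_num]
  rw [PySem.List.getElem?_map_pyRange_zero _ _ _ (by omega)]
  rw [Int.toNat_of_nonneg h0]

-- carres[max(-j,j)] = j*j for |j| ≤ 50
theorem pvCarres_lookup (j : Int) (hlo : -50 ≤ j) (hhi : j ≤ 50) :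
    (PySem.List.pyGet? pvCarres (max (-j) j)).getD 0 = j * j := by
  rcases le_or_gt 0 j with hj | hj
  · rw [max_eq_right (by omega), pvCarres_get j hj hhi]; rfl
  · rw [max_eq_left (by omega), pvCarres_get (-j) (by omega) (by omega), neg_mul_neg]; rfl

-- the dict B builds maps s*s back to s; keys never collide since squaring is injective on 0..r
theorem roots_get_none (L : List Int) (d : PySem.Dict Int Int) (c : Int)
    (hc : ∀ t ∈ L, t*t ≠ c) :
    (L.foldl (fun d s => d.insert (s*s) s) d).get? c = d.get? c := by
  induction L generalizing d with
  | nil => rfl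
  | cons a L ih =>
    simp only [List.foldl_cons]
    rw [ih _ (fun t ht => hc t (List.mem_cons_of_mem _ ht))]
    rw [PySem.Dict.get?_insert]
    rw [if_neg (fun h => hc a List.mem_cons_self h.symm)]

theorem roots_get_some (L : List Int) (d : PySem.Dict Int Int) (s : Int)
    (hpos : ∀ t ∈ L, 0 ≤ t) (hnd : L.Nodup) (hs : s ∈ L) :
    (L.foldl (fun d s => d.insert (s*s) s) d).get? (s*s) = some s := by
  induction L generalizing d with
  | nil => cases hs
  | cons a L ih =>
    simp only [List.foldl_cons]
    rcases List.mem_cons.mp hs with rfl | hs'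
    · have hsn : s ∉ L := (List.nodup_cons.mp hnd).1
      rw [roots_get_none]
      · rw [PySem.Dict.get?_insert]; simp
      · intro t ht heq
        have h1 : 0 ≤ t := hpos t (List.mem_cons_of_mem _ ht)
        have h2 : 0 ≤ s := hpos s List.mem_cons_self
        have : t = s := by nlinarith
        exact hsn (this ▸ ht)
    · exact ih _ (fun t ht => hpos t (List.mem_cons_of_mem _ ht)) (List.nodup_cons.mp hnd).2 hs'

-- A's k-scan keeps exactly the roots of k*k = c
theorem filter_sq (r s : Int) (h0 : 0 ≤ s) (hsr : s ≤ r) :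
    (PySem.List.pyRange (-r) (r+1) 1).filter (fun k => decide (k*k = s*s)) =
      if 0 < s then [-s, s] else [0] := by
  have hmm : ∀ k : Int, k*k = s*s ↔ (k = s ∨ k = -s) := fun k => mul_self_eq_mul_self_iff
  rw [PySem.List.pyRange_one_append (-r) (-s) (r+1) (by omega) (by omega)]
  rw [PySem.List.pyRange_one_append (-s) (s+1) (r+1) (by omega) (by omega)]
  rw [List.filter_append, List.filter_append]
  have h1 : (PySem.List.pyRange (-r) (-s) 1).filter (fun k => decide (k*k = s*s)) = [] := by
    rw [List.filter_eq_nil_iff]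
    intro k hk
    have := PySem.List.mem_pyRange_one.mp hk
    simp only [decide_eq_true_eq, hmm]
    omega
  have h3 : (PySem.List.pyRange (s+1) (r+1) 1).filter (fun k => decide (k*k = s*s)) = [] := by
    rw [List.filter_eq_nil_iff]
    intro k hk
    have := PySem.List.mem_pyRange_one.mp hk
    simp only [decide_eq_true_eq, hmm]
    omega
  rw [h1, h3, List.nil_append, List.append_nil]
  rcases lt_or_eq_of_le h0 with hpos | heq
  · rw [if_pos hpos]
    rw [PySem.List.pyRange_one_succ_right (show -s ≤ s by omega)]
    rw [PySem.List.pyRange_one_cons (show -s < s by omega)]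
    rw [List.filter_append, List.filter_cons]
    have h2 : (PySem.List.pyRange (-s+1) s 1).filter (fun k => decide (k*k = s*s)) = [] := by
      rw [List.filter_eq_nil_iff]
      intro k hk
      have := PySem.List.mem_pyRange_one.mp hk
      simp only [decide_eq_true_eq, hmm]
      omega
    rw [h2]
    simp only [neg_mul_neg, decide_eq_true_eq, List.filter_cons, List.filter_nil]
    simp
  · subst heq
    rw [if_neg (by omega)]
    decide

theorem filter_sq_none (r c : Int) (hc : ∀ s, 0 ≤ s → s ≤ r → s*s ≠ c) :
    (PySem.List.pyRange (-r) (r+1) 1).filter (fun k => decide (k*k = c)) = [] := by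
  rw [List.filter_eq_nil_iff]
  intro k hk
  have hb := PySem.List.mem_pyRange_one.mp hk
  simp only [decide_eq_true_eq]
  intro hkk
  rcases le_or_gt 0 k with h | h
  · exact hc k h (by omega) hkk
  · exact hc (-k) (by omega) (by omega) (by rw [neg_mul_neg]; exact hkk)

-- ===== VERDICT (by name: the statement is the Claim_ definition above) =====
theorem get_lattice_point_spec : Claim_equal_get_lattice_point := by
  intro r _ hpre
  unfold Spec_get_lattice_point
  obtain ⟨hlo, hhi⟩ := hpre
  rcases le_or_gt 0 r with h0 | h0
  · -- 0 ≤ r ≤ 50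
    simp only [get_lattice_point, get_lattice_point_alt, pvCarres_get r h0 hhi]
    apply PySem.List.foldl_congr_mem
    intro acc i hi
    obtain ⟨hi0, hir⟩ := PySem.List.mem_pyRange_one.mp hi
    rw [pvCarres_lookup i (by omega) (by omega)]
    apply PySem.List.foldl_congr_mem
    intro acc' j hj
    obtain ⟨hj0, hjr⟩ := PySem.List.mem_pyRange_one.mp hj
    rw [pvCarres_lookup j (by omega) (by omega)]
    rw [PySem.List.foldl_congr_mem _ _
        (fun l k => if i*i + j*j + k*k = r*r then l ++ [[i, j, k]] else l) _
        (by
          intro a k hk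
          obtain ⟨hk0, hkr⟩ := PySem.List.mem_pyRange_one.mp hk
          rw [pvCarres_lookup k (by omega) (by omega)])]
    rw [PySem.List.foldl_append_ite (fun k => i*i + j*j + k*k = r*r) (fun k => [i, j, k])]
    have hpred : (fun k : Int => decide (i*i + j*j + k*k = r*r)) =
        (fun k : Int => decide (k*k = r*r - i*i - j*j)) := by
      funext k
      exact decide_eq_decide.mpr (by constructor <;> intro h <;> omega)
    rw [hpred]
    by_cases hex : ∃ s : Int, 0 ≤ s ∧ s ≤ r ∧ s*s = r*r - i*i - j*j
    · obtain ⟨s, hs0, hsr, hss⟩ := hex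
      have hg : (pvRoots r).get? (r*r - i*i - j*j) = some s := by
        rw [← hss]
        exact roots_get_some _ _ _ (fun t ht => (PySem.List.mem_pyRange_one.mp ht).1)
          (PySem.List.nodup_pyRange_one _ _) (PySem.List.mem_pyRange_one.mpr ⟨hs0, by omega⟩)
      rw [hg, ← hss, filter_sq r s hs0 hsr]
      by_cases hsp : 0 < s
      · simp [hsp]
      · have : s = 0 := by omega
        subst this
        simp
    · push Not at hex
      have hg : (pvRoots r).get? (r*r - i*i - j*j) = none := by
        unfold pvRoots
        rw [roots_get_none _ _ _ (by
          intro t ht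
          obtain ⟨ht0, htr⟩ := PySem.List.mem_pyRange_one.mp ht
          exact hex t ht0 (by omega))]
        rfl
      rw [hg, filter_sq_none r _ (fun s hs0 hsr => hex s hs0 hsr), List.map_nil, List.append_nil]
  · -- r < 0: empty loops on both sides
    simp only [get_lattice_point, get_lattice_point_alt,
      PySem.List.pyRange_one_eq_nil (show r + 1 ≤ 0 by omega), List.foldl_nil]
    cases PySem.List.pyGet? pvCarres r <;> rfl
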